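-- pv_equiv track=rewrite | github.com/reatcat/C4-5G | code_and_data/analyse.py | getdataByalarmlevel
-- ===== SOURCE A (Python) =====
-- def getdataByalarmlevel(data):
--     '''
--         根据alarmlevel划分数据
--     '''
--     level0, level1, level2, level3 = 0, 0, 0, 0
--     for alarm in data:
--         if alarm[3] == 0:
--             level0+=1
--         elif alarm[3] == 1:
--             level1+=1
--         elif alarm[3] == 2:
--             level2+=1
--         else:
--             level3+=1
--     return level0,level1,level2,level3
-- ===== SOURCE B (Python) =====
-- def getdataByalarmlevel(data):
--     '''
--         根据alarmlevel划分数据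
--     '''
--     def go(chunk):
--         if not chunk:
--             return (0, 0, 0, 0)
--         if len(chunk) == 1:
--             v = chunk[0][3]
--             if v == 0:
--                 return (1, 0, 0, 0)
--             if v == 1:
--                 return (0, 1, 0, 0)
--             if v == 2:
--                 return (0, 0, 1, 0)
--             return (0, 0, 0, 1)
--         mid = len(chunk) // 2
--         a = go(chunk[:mid])
--         b = go(chunk[mid:])
--         return (a[0] + b[0], a[1] + b[1], a[2] + b[2], a[3] + b[3])
--     return go(list(data))
-- ===== Notes on version B (the rewrite author's own statement) =====
-- stated objective: alternative
-- what changed: Replaces A's single left-to-right pass with four mutable counters by a divide-and-conquer recursion: split the list in half, classify single elements into a unit 4-tuple at the leaves, and combine subresults by component-wise tuple addition (correct because the four counts are additive over concatenation).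
import Mathlib
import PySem

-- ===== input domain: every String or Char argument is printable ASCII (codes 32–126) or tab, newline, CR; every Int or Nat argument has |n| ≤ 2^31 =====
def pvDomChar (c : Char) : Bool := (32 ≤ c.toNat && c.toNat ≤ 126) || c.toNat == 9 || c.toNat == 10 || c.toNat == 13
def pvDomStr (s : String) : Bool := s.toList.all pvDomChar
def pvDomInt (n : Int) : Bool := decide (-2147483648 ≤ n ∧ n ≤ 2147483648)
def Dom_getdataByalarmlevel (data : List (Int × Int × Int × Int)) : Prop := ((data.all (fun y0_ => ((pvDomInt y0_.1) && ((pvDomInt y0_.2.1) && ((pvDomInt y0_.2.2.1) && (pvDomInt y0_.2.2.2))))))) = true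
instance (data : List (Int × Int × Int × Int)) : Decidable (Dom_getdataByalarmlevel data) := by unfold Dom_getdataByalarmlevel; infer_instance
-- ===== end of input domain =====

-- B replaces A's single pass with four counters by a divide-and-conquer recursion
-- (split in half, unit tuples at leaves, component-wise addition); objective: alternative.

-- ===== PORT A =====
-- A: one pass with a 4-way if/elif/else over four explicit counters.
def getdataByalarmlevel (data : List (Int × Int × Int × Int)) : Int × Int × Int × Int :=
  data.foldl (fun s alarm =>
    if alarm.2.2.2 == 0 then (s.1 + 1, s.2.1, s.2.2.1, s.2.2.2)
    else if alarm.2.2.2 == 1 then (s.1, s.2.1 + 1, s.2.2.1, s.2.2.2)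
    else if alarm.2.2.2 == 2 then (s.1, s.2.1, s.2.2.1 + 1, s.2.2.2)
    else (s.1, s.2.1, s.2.2.1, s.2.2.2 + 1)) (0, 0, 0, 0)

-- ===== PORT B =====
-- B's recursive helper 'go': empty → zeros, singleton → unit tuple, else split at len//2 and add.
def pvGo (chunk : List (Int × Int × Int × Int)) : Int × Int × Int × Int :=
  match chunk with
  | [] => (0, 0, 0, 0)
  | [alarm] =>
    if alarm.2.2.2 == 0 then (1, 0, 0, 0)
    else if alarm.2.2.2 == 1 then (0, 1, 0, 0)
    else if alarm.2.2.2 == 2 then (0, 0, 1, 0)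
    else (0, 0, 0, 1)
  | x :: y :: rest =>
    let l := x :: y :: rest
    let mid := l.length / 2
    let a := pvGo (l.take mid)
    let b := pvGo (l.drop mid)
    (a.1 + b.1, a.2.1 + b.2.1, a.2.2.1 + b.2.2.1, a.2.2.2 + b.2.2.2)
termination_by chunk.length
decreasing_by
  · simp only [List.length_take, List.length_cons]; omega
  · simp only [List.length_drop, List.length_cons]; omega

def getdataByalarmlevel_alt (data : List (Int × Int × Int × Int)) : Int × Int × Int × Int :=
  pvGo data

-- ===== PRECONDITION & SPEC =====
def Spec_getdataByalarmlevel (data : List (Int × Int × Int × Int)) (out : Int × Int × Int × Int) : Prop := out = getdataByalarmlevel_alt data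
instance (data : List (Int × Int × Int × Int)) (out : Int × Int × Int × Int) : Decidable (Spec_getdataByalarmlevel data out) := by unfold Spec_getdataByalarmlevel; infer_instance

-- ===== CLAIM (what is proved, stated in full; the proofs are below) =====
def Claim_equal_getdataByalarmlevel : Prop := ∀ (data : List (Int × Int × Int × Int)), Dom_getdataByalarmlevel data → Spec_getdataByalarmlevel data (getdataByalarmlevel data)

-- ===== LEMMAS AND PROOFS =====

-- The canonical count vector: (count of 0s, 1s, 2s, rest) among the alarm[3] values.
def pvCounts (l : List (Int × Int × Int × Int)) : Int × Int × Int × Int :=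
  (((l.map (fun a => a.2.2.2)).count 0 : Int),
   ((l.map (fun a => a.2.2.2)).count 1 : Int),
   ((l.map (fun a => a.2.2.2)).count 2 : Int),
   (l.length : Int)
     - ((l.map (fun a => a.2.2.2)).count 0 : Int)
     - ((l.map (fun a => a.2.2.2)).count 1 : Int)
     - ((l.map (fun a => a.2.2.2)).count 2 : Int))

-- A's fold, from an arbitrary accumulator, adds the per-level counts of the list.
theorem getdataByalarmlevel_foldl_eq (data : List (Int × Int × Int × Int))
    (l0 l1 l2 l3 : Int) :
    data.foldl (fun s alarm =>
      if alarm.2.2.2 == 0 then (s.1 + 1, s.2.1, s.2.2.1, s.2.2.2)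
      else if alarm.2.2.2 == 1 then (s.1, s.2.1 + 1, s.2.2.1, s.2.2.2)
      else if alarm.2.2.2 == 2 then (s.1, s.2.1, s.2.2.1 + 1, s.2.2.2)
      else (s.1, s.2.1, s.2.2.1, s.2.2.2 + 1)) (l0, l1, l2, l3)
    = (l0 + (pvCounts data).1, l1 + (pvCounts data).2.1,
       l2 + (pvCounts data).2.2.1, l3 + (pvCounts data).2.2.2) := by
  induction data generalizing l0 l1 l2 l3 with
  | nil => simp [pvCounts]
  | cons a rest ih =>
    simp only [List.foldl_cons]
    by_cases h0 : a.2.2.2 = 0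
    · rw [if_pos (by simp [h0]), ih]
      simp [pvCounts, List.count_cons, h0]; omega
    · by_cases h1 : a.2.2.2 = 1
      · rw [if_neg (by simp [h0]), if_pos (by simp [h1]), ih]
        simp [pvCounts, List.count_cons, h0, h1]; omega
      · by_cases h2 : a.2.2.2 = 2
        · rw [if_neg (by simp [h0]), if_neg (by simp [h1]), if_pos (by simp [h2]), ih]
          simp [pvCounts, List.count_cons, h0, h1, h2]; omega
        · rw [if_neg (by simp [h0]), if_neg (by simp [h1]), if_neg (by simp [h2]), ih]
          simp [pvCounts, List.count_cons, h0, h1, h2]; omega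

-- pvCounts is additive over concatenation.
theorem pvCounts_append (s t : List (Int × Int × Int × Int)) :
    pvCounts (s ++ t)
    = ((pvCounts s).1 + (pvCounts t).1, (pvCounts s).2.1 + (pvCounts t).2.1,
       (pvCounts s).2.2.1 + (pvCounts t).2.2.1, (pvCounts s).2.2.2 + (pvCounts t).2.2.2) := by
  simp only [pvCounts, List.map_append, List.count_append, List.length_append, Prod.mk.injEq]
  refine ⟨?_, ?_, ?_, ?_⟩ <;> push_cast <;> omega

-- B's divide-and-conquer computes the count vector.
theorem pvGo_eq (chunk : List (Int × Int × Int × Int)) : pvGo chunk = pvCounts chunk := by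
  induction chunk using pvGo.induct with
  | case1 => simp [pvGo, pvCounts]
  | case2 alarm h0 =>
    rw [pvGo, if_pos h0]
    have h0' : alarm.2.2.2 = 0 := by simpa using h0
    simp [pvCounts, List.count_cons, h0']
  | case3 alarm h0 h1 =>
    rw [pvGo, if_neg h0, if_pos h1]
    have h0' : alarm.2.2.2 ≠ 0 := by simpa using h0
    have h1' : alarm.2.2.2 = 1 := by simpa using h1
    simp [pvCounts, List.count_cons, h0', h1']
  | case4 alarm h0 h1 h2 =>
    rw [pvGo, if_neg h0, if_neg h1, if_pos h2]
    have h0' : alarm.2.2.2 ≠ 0 := by simpa using h0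
    have h1' : alarm.2.2.2 ≠ 1 := by simpa using h1
    have h2' : alarm.2.2.2 = 2 := by simpa using h2
    simp [pvCounts, List.count_cons, h0', h1', h2']
  | case5 alarm h0 h1 h2 =>
    rw [pvGo, if_neg h0, if_neg h1, if_neg h2]
    have h0' : alarm.2.2.2 ≠ 0 := by simpa using h0
    have h1' : alarm.2.2.2 ≠ 1 := by simpa using h1
    have h2' : alarm.2.2.2 ≠ 2 := by simpa using h2
    simp [pvCounts, List.count_cons, h0', h1', h2']
  | case6 x y rest l mid ih1 ih2 =>
    rw [pvGo]
    rw [ih1, ih2]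
    have h := pvCounts_append ((x :: y :: rest).take ((x :: y :: rest).length / 2))
      ((x :: y :: rest).drop ((x :: y :: rest).length / 2))
    rw [List.take_append_drop] at h
    rw [h]

-- ===== VERDICT (by name: the statement is the Claim_ definition above) =====
theorem getdataByalarmlevel_spec : Claim_equal_getdataByalarmlevel := by
  intro data _
  show getdataByalarmlevel data = getdataByalarmlevel_alt data
  unfold getdataByalarmlevel getdataByalarmlevel_alt
  rw [getdataByalarmlevel_foldl_eq, pvGo_eq]
  simp
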